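-- pv_equiv track=rewrite | github.com/AZX-215/Gravity-List-Bot | gravity_capture.py | _find_assets
-- ===== SOURCE A (Python) =====
-- from typing import Optional, Dict, Any
--
-- def _find_assets(release_json: Dict[str, Any]) -> Dict[str, str]:
--     """Return {'exe': url, 'zip': url} if present."""
--     exe_url: Optional[str] = None
--     zip_url: Optional[str] = None
--
--     for a in release_json.get("assets", []):
--         name = (a.get("name") or "").lower()
--         url = a.get("browser_download_url")
--         if not url:
--             continue
--         if name.endswith(".exe") and "setup" in name:
--             exe_url = url
--         elif name.endswith(".zip") and "portable" in name:
--             zip_url = url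
--
--     return {"exe": exe_url or "", "zip": zip_url or ""}
-- ===== SOURCE B (Python) =====
-- def _find_assets(release_json):
--     """Return {'exe': url, 'zip': url} if present."""
--     assets = release_json.get("assets", [])
--
--     def url(a):
--         return a.get("browser_download_url") or ""
--
--     def name(a):
--         return (a.get("name") or "").lower()
--
--     def keep(suffix, word):
--         return lambda a: url(a) != "" and name(a).endswith(suffix) and word in name(a)
--
--     exes = [url(a) for a in filter(keep(".exe", "setup"), assets)]
--     zips = [url(a) for a in filter(keep(".zip", "portable"), assets)]
--     return {"exe": exes[-1] if exes else "", "zip": zips[-1] if zips else ""}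
-- ===== Notes on version B (the rewrite author's own statement) =====
-- stated objective: simpler
-- what changed: Replaces the interleaved overwrite loop over shared mutable state with two independent filter-then-map passes (one per asset kind) that take the last matching URL, so the selection rule is stated declaratively instead of via last-write-wins assignment.
import Mathlib
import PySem

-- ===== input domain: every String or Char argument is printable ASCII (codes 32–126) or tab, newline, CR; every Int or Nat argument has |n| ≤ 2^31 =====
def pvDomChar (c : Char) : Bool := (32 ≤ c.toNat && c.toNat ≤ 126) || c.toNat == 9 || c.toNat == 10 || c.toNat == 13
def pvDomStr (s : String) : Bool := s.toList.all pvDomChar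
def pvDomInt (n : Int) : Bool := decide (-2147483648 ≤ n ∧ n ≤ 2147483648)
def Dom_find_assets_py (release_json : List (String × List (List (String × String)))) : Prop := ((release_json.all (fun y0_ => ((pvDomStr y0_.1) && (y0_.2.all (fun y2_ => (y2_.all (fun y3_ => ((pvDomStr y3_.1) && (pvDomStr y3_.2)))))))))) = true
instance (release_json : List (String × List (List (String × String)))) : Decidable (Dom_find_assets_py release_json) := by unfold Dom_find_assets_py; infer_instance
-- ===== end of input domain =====

-- ===== PORT A =====
-- B changes: two independent filter/map passes picking the last matching URL, instead of A's single overwrite loop (objective: simpler).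
def aStep (st : Option String × Option String) (a : List (String × String)) :
    Option String × Option String :=
  let name := PySem.Str.lower (((PySem.Dict.mk a).get? "name").getD "")
  match (PySem.Dict.mk a).get? "browser_download_url" with
  | none => st
  | some url =>
    if url = "" then st
    else if PySem.Str.endswith name ".exe" && PySem.Str.isIn "setup" name then (some url, st.2)
    else if PySem.Str.endswith name ".zip" && PySem.Str.isIn "portable" name then (st.1, some url)
    else st

def find_assets_py (release_json : List (String × List (List (String × String)))) : List (String × String) :=
  let assets := ((PySem.Dict.mk release_json).get? "assets").getD []
  let r := assets.foldl aStep (none, none)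
  [("exe", r.1.getD ""), ("zip", r.2.getD "")]

-- ===== PORT B =====
def bUrl (a : List (String × String)) : String :=
  ((PySem.Dict.mk a).get? "browser_download_url").getD ""

def bName (a : List (String × String)) : String :=
  PySem.Str.lower (((PySem.Dict.mk a).get? "name").getD "")

def bKeep (suffix word : String) (a : List (String × String)) : Bool :=
  (!(bUrl a == "")) && PySem.Str.endswith (bName a) suffix && PySem.Str.isIn word (bName a)

def find_assets_py_alt (release_json : List (String × List (List (String × String)))) : List (String × String) :=
  let assets := ((PySem.Dict.mk release_json).get? "assets").getD []
  let exes := (assets.filter (bKeep ".exe" "setup")).map bUrl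
  let zips := (assets.filter (bKeep ".zip" "portable")).map bUrl
  [("exe", exes.getLast?.getD ""), ("zip", zips.getLast?.getD "")]

-- ===== PRECONDITION & SPEC =====
def Spec_find_assets_py (release_json : List (String × List (List (String × String)))) (out : List (String × String)) : Prop := out = find_assets_py_alt release_json
instance (release_json : List (String × List (List (String × String)))) (out : List (String × String)) : Decidable (Spec_find_assets_py release_json out) := by unfold Spec_find_assets_py; infer_instance

-- ===== CLAIM (what is proved, stated in full; the proofs are below) =====
def Claim_equal_find_assets_py : Prop := ∀ (release_json : List (String × List (List (String × String)))), Dom_find_assets_py release_json → Spec_find_assets_py release_json (find_assets_py release_json)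

-- ===== LEMMAS AND PROOFS =====

-- a name cannot end with both ".exe" and ".zip"
lemma not_exe_and_zip (s : String) (he : PySem.Str.endswith s ".exe" = true) :
    PySem.Str.endswith s ".zip" = false := by
  by_contra h
  have hz : PySem.Str.endswith s ".zip" = true := by
    cases hzip : PySem.Str.endswith s ".zip" <;> simp_all
  rw [PySem.Str.endswith_eq] at he hz
  rw [PySem.Chars.endswith_iff] at he hz
  obtain ⟨t1, h1⟩ := he
  obtain ⟨t2, h2⟩ := hz
  have : t1 ++ ".exe".toList = t2 ++ ".zip".toList := h1.trans h2.symm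
  have := (List.append_inj' this (by decide)).2
  simp at this

lemma getLast?_cons_or {α : Type} (x : α) (l : List α) :
    (x :: l).getLast? = (l.getLast?).or (some x) := by
  cases l with
  | nil => simp
  | cons b t =>
    have h : (b :: t).getLast?.isSome := by simp [List.getLast?_isSome]
    rw [List.getLast?_cons_cons]
    obtain ⟨v, hv⟩ := Option.isSome_iff_exists.mp h
    simp [hv]

lemma step_eq (e z : Option String) (a : List (String × String)) :
    aStep (e, z) a =
      ((if bKeep ".exe" "setup" a then some (bUrl a) else e),
       (if bKeep ".zip" "portable" a then some (bUrl a) else z)) := by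
  unfold aStep bKeep bUrl bName
  cases hu : (PySem.Dict.mk a).get? "browser_download_url" with
  | none => simp
  | some u =>
    by_cases hu0 : u = ""
    · simp [hu0]
    · have hne : (u == "") = false := by simp [hu0]
      simp only [Option.getD_some, if_neg hu0]
      set n := PySem.Str.lower (((PySem.Dict.mk a).get? "name").getD "") with hn
      cases he : PySem.Str.endswith n ".exe" <;>
      cases hs : PySem.Str.isIn "setup" n <;>
      cases hz : PySem.Str.endswith n ".zip" <;>
      cases hp : PySem.Str.isIn "portable" n <;>
        first
          | (rw [not_exe_and_zip n he] at hz; exact (Bool.false_ne_true hz).elim)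
          | (simp only [hne]; simp)

lemma loop_eq (assets : List (List (String × String))) (e z : Option String) :
    assets.foldl aStep (e, z) =
      ((((assets.filter (bKeep ".exe" "setup")).map bUrl).getLast?).or e,
       (((assets.filter (bKeep ".zip" "portable")).map bUrl).getLast?).or z) := by
  induction assets generalizing e z with
  | nil => simp
  | cons a rest ih =>
    rw [List.foldl_cons, step_eq, ih]
    cases hke : bKeep ".exe" "setup" a <;> cases hkz : bKeep ".zip" "portable" a <;>
      simp [hke, hkz, getLast?_cons_or]

-- ===== VERDICT (by name: the statement is the Claim_ definition above) =====
theorem find_assets_py_spec : Claim_equal_find_assets_py := by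
  intro rj _
  unfold Spec_find_assets_py
  simp [find_assets_py, find_assets_py_alt, loop_eq]
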